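-- pv_equiv track=rewrite | github.com/rjuzair/Markov-Text-Generator | text_stats.py | common_successor_words
-- ===== SOURCE A (Python) =====
-- import collections
-- from string import punctuation
--
-- def all_words(file_data):
--
--     words = []
--
--     lines = [line.split() for line in file_data]
--     temp = [[one_word.strip(punctuation).lower() for one_word in line] for line in lines]
--
--     for i in temp:
--         words += i
--     return words
--
-- def m_common_words(file_data):
--
--     words = all_words(file_data)
--     num_common_words = 5
--     common_words = collections.Counter(words).most_common(num_common_words)
--     return common_words
--
-- def common_successor_words(file_data):
--
--     num_successors = 3
--     words = all_words(file_data)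
--     temp = dict(m_common_words(file_data))
--     common_words = [i[:] for i in temp]
--     common_words = {i: {} for i in common_words}
--     for word in temp.keys():
--         for i in range(len(words)):
--             if word == words[i]:
--                 if words[i+1] in common_words[word].keys():
--                     common_words[word][words[i+1]] += 1
--                 else:
--                     common_words[word][words[i+1]] = 1
--
--     for word in common_words.keys():
--         common_words[word] = dict(collections.Counter(common_words[word]).most_common(num_successors))
--
--     return dict(common_words)
-- ===== SOURCE B (Python) =====
-- import collections
-- from string import punctuation
--
--
-- def all_words(file_data):
--     words = []
--     for line in file_data:
--         for one_word in line.split():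
--             words.append(one_word.strip(punctuation).lower())
--     return words
--
--
-- def common_successor_words(file_data):
--     num_successors = 3
--     words = all_words(file_data)
--     common = collections.Counter(words).most_common(5)
--     succ_counts = {w: {} for w, _ in common}
--     for i in range(len(words)):
--         w = words[i]
--         if w in succ_counts:
--             nxt = words[i + 1]
--             inner = succ_counts[w]
--             inner[nxt] = inner.get(nxt, 0) + 1
--     return {w: dict(collections.Counter(inner).most_common(num_successors))
--             for w, inner in succ_counts.items()}
-- ===== Notes on version B (the rewrite author's own statement) =====
-- stated objective: faster
-- what changed: A rescans the whole word list once per common word (5 full passes, each doing a dict lookup per match); B makes ONE pass over the word list, dispatching each word to its successor-counter by membership in the prebuilt mapping, then truncates each counter to its top 3.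
import Mathlib
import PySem

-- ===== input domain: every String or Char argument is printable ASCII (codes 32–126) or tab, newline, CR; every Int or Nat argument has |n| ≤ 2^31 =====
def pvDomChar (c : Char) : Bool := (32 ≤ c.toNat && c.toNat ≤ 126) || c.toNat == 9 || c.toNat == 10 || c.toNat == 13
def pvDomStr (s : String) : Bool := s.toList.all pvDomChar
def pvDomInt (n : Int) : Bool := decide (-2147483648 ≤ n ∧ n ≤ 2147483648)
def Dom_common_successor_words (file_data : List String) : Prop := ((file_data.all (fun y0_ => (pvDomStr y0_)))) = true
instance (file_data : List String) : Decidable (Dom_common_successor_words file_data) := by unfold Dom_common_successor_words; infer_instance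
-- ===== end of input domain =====

-- B replaces A's five full scans of the word list (one per common word) by ONE pass
-- dispatched by membership in the prebuilt successor-counter mapping; same return value.

-- ===== PORT A =====

-- string.punctuation
def pvPunct : String := "!\"#$%&'()*+,-./:;<=>?@[\\]^_`{|}~"

-- one_word.strip(punctuation).lower()
def pvCleanWord (w : String) : String := PySem.Str.lower (PySem.Str.stripChars w pvPunct)

-- all_words (module helper used by both A and B)
def pvAllWords (file_data : List String) : List String :=
  let lines := file_data.map PySem.Str.split₀
  let temp := lines.map (fun line => line.map pvCleanWord)
  temp.foldl (fun words i => words ++ i) []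

-- collections.Counter(words).most_common(5)  (module helper m_common_words; B calls the same expression)
def pvMostCommon5 (words : List String) : List (String × Int) :=
  (PySem.List.sorted (PySem.Dict.counter words).items (fun p => p.2) true).take 5

def common_successor_words (file_data : List String) : List (String × List (String × Int)) :=
  let words := pvAllWords file_data
  let temp : PySem.Dict String Int := PySem.Dict.ofList (pvMostCommon5 words)
  -- common_words = [i[:] for i in temp]
  let common_keys : List String := (PySem.Dict.keys temp).map (fun i => PySem.Str.slice i none none)
  -- common_words = {i: {} for i in common_words}
  let cw0 : PySem.Dict String (PySem.Dict String Int) :=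
    common_keys.foldl (fun d i => d.insert i PySem.Dict.empty) PySem.Dict.empty
  -- for word in temp.keys(): for i in range(len(words)): …
  let cw1 := (PySem.Dict.keys temp).foldl (fun d word =>
    (PySem.List.pyRange 0 (words.length : Int) 1).foldl (fun d i =>
      if word == PySem.List.pyGetD words i "" then
        -- words[i+1]: raises IndexError at i = len-1; Pre_ excludes that case (pyGetD default unreached)
        let succ := PySem.List.pyGetD words (i + 1) ""
        let inner := PySem.Dict.getD d word PySem.Dict.empty
        if PySem.Dict.contains inner succ then
          d.insert word (inner.insert succ (PySem.Dict.getD inner succ 0 + 1))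
        else
          d.insert word (inner.insert succ 1)
      else d) d) cw0
  -- for word in common_words.keys(): common_words[word] = dict(Counter(…).most_common(3))
  let cw2 := (PySem.Dict.keys cw1).foldl (fun d word =>
    d.insert word (PySem.Dict.ofList
      ((PySem.List.sorted (PySem.Dict.getD d word PySem.Dict.empty).items (fun q => q.2) true).take 3))) cw1
  cw2.items.map (fun p => (p.1, p.2.items))

-- ===== PORT B =====
def common_successor_words_alt (file_data : List String) : List (String × List (String × Int)) :=
  let words := pvAllWords file_data
  let common := pvMostCommon5 words
  -- succ_counts = {w: {} for w, _ in common}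
  let d0 : PySem.Dict String (PySem.Dict String Int) :=
    common.foldl (fun d p => d.insert p.1 PySem.Dict.empty) PySem.Dict.empty
  -- single pass: for i in range(len(words)): …
  let filled := (PySem.List.pyRange 0 (words.length : Int) 1).foldl (fun d i =>
    let w := PySem.List.pyGetD words i ""
    if PySem.Dict.contains d w then
      -- words[i+1]: raises IndexError at i = len-1 exactly as A does; Pre_ excludes it
      let nxt := PySem.List.pyGetD words (i + 1) ""
      PySem.Dict.modify d w PySem.Dict.empty
        (fun inner => inner.insert nxt (PySem.Dict.getD inner nxt 0 + 1))
    else d) d0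
  -- {w: dict(Counter(inner).most_common(3)) for w, inner in succ_counts.items()}
  let out := filled.items.foldl (fun d p =>
    d.insert p.1 (PySem.Dict.ofList
      ((PySem.List.sorted p.2.items (fun q => q.2) true).take 3))) PySem.Dict.empty
  out.items.map (fun p => (p.1, p.2.items))

-- ===== PRECONDITION & SPEC =====
-- A raises IndexError (words[i+1] with i = len(words)-1) exactly when the word list is nonempty and
-- its LAST word is one of the 5 most common words; Pre_ excludes exactly those inputs (B raises there too).
def Pre_common_successor_words (file_data : List String) : Prop :=
  ((pvAllWords file_data).getLast?.all
    (fun w => !(((pvMostCommon5 (pvAllWords file_data)).map Prod.fst).contains w))) = true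
instance (file_data : List String) : Decidable (Pre_common_successor_words file_data) := by
  unfold Pre_common_successor_words; infer_instance

def pvWitness_common_successor_words : List String := ["the cat sat on the mat", "a dog"]

def Spec_common_successor_words (file_data : List String) (out : List (String × List (String × Int))) : Prop := out = common_successor_words_alt file_data
instance (file_data : List String) (out : List (String × List (String × Int))) : Decidable (Spec_common_successor_words file_data out) := by unfold Spec_common_successor_words; infer_instance

-- ===== CLAIM (what is proved, stated in full; the proofs are below) =====
def Claim_equal_common_successor_words : Prop := ∀ (file_data : List String), Dom_common_successor_words file_data → Pre_common_successor_words file_data → Spec_common_successor_words file_data (common_successor_words file_data)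

-- ===== LEMMAS AND PROOFS =====

-- inner-counter update shared by the proofs: e[nxt] = e.get(nxt, 0) + 1
def pvUpd (nxt : String) (e : PySem.Dict String Int) : PySem.Dict String Int :=
  e.insert nxt (PySem.Dict.getD e nxt 0 + 1)

-- i[:] is the identity on strings
theorem pv_slice_id (s : String) : PySem.Str.slice s none none = s := by
  have h : List.take s.length s.toList = s.toList := by
    rw [show s.length = s.toList.length from rfl, List.take_length]
  simp [PySem.Str.slice, PySem.Chars.slice_eq_listSlice, PySem.List.slice, h, String.ofList_toList]

-- with unique keys, get? returns the value of the (unique) entry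
theorem pv_get?_nodup {ν : Type} (its : List (String × ν)) (h : (its.map Prod.fst).Nodup)
    (p : String × ν) (hp : p ∈ its) : (PySem.Dict.mk its).get? p.1 = some p.2 := by
  induction its with
  | nil => cases hp
  | cons a t ih =>
    simp only [List.map_cons, List.nodup_cons] at h
    rcases List.mem_cons.mp hp with rfl | hpt
    · simp [PySem.Dict.get?]
    · have hne : a.1 ≠ p.1 := fun he => h.1 (he ▸ List.mem_map_of_mem hpt)
      have := ih h.2 hpt
      simpa [PySem.Dict.get?, List.find?_cons, beq_eq_false_iff_ne.mpr hne] using this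

theorem pv_contains_eq_false {ν : Type} (its : List (String × ν)) (k : String)
    (h : (PySem.Dict.mk its).contains k = false) : ∀ p ∈ its, p.1 ≠ k := by
  intro p hp
  simp only [PySem.Dict.contains, List.any_eq_false] at h
  simpa using h p hp

theorem pv_contains_of_mem {ν : Type} (its : List (String × ν)) (p : String × ν)
    (hp : p ∈ its) : (PySem.Dict.mk its).contains p.1 = true := by
  simp only [PySem.Dict.contains, List.any_eq_true]
  exact ⟨p, hp, by simp⟩

-- insert on a present key rewrites the items pointwise
theorem pv_insert_of_contains {ν : Type} (d : PySem.Dict String ν) (k : String) (v : ν)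
    (h : d.contains k = true) :
    (d.insert k v).items = d.items.map (fun p => if p.1 == k then (k, v) else p) := by
  simp [PySem.Dict.insert, h]

theorem pv_keys_insert_of_contains {ν : Type} (d : PySem.Dict String ν) (k : String) (v : ν)
    (h : d.contains k = true) : (d.insert k v).keys = d.keys := by
  simp only [PySem.Dict.keys, pv_insert_of_contains d k v h, List.map_map]
  refine List.map_congr_left (fun p _ => ?_)
  by_cases hk : p.1 = k <;> simp [hk]

theorem pv_insert_insert {ν : Type} (d : PySem.Dict String ν) (k : String) (v v' : ν) :
    (d.insert k v).insert k v' = d.insert k v' := by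
  by_cases h : d.contains k = true
  · have h2 : (d.insert k v).contains k = true := by
      have := PySem.Dict.get?_insert_self d k v
      rcases hc : (d.insert k v).contains k with _ | _
      · rw [(PySem.Dict.get?_eq_none_iff_contains _ _).mpr hc] at this; cases this
      · rfl
    apply PySem.Dict.ext
    rw [pv_insert_of_contains _ _ _ h2, pv_insert_of_contains _ _ _ h,
        pv_insert_of_contains _ _ _ h, List.map_map]
    refine List.map_congr_left (fun p _ => ?_)
    by_cases hk : p.1 = k <;> simp [hk]
  · have h' : d.contains k = false := Bool.eq_false_iff.mpr h
    have h2 : (d.insert k v).contains k = true := by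
      have := PySem.Dict.get?_insert_self d k v
      rcases hc : (d.insert k v).contains k with _ | _
      · rw [(PySem.Dict.get?_eq_none_iff_contains _ _).mpr hc] at this; cases this
      · rfl
    apply PySem.Dict.ext
    rw [pv_insert_of_contains _ _ _ h2]
    have hmap : d.items.map (fun p => if p.1 == k then (k, v') else p) = d.items := by
      refine (List.map_congr_left (fun p hp => ?_)).trans (List.map_id _)
      have : p.1 ≠ k := pv_contains_eq_false d.items k h' p hp
      simp [beq_eq_false_iff_ne.mpr this]
    have hv : (d.insert k v).items = d.items ++ [(k, v)] := by simp [PySem.Dict.insert, h']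
    have hv' : (d.insert k v').items = d.items ++ [(k, v')] := by simp [PySem.Dict.insert, h']
    rw [hv, hv', List.map_append, hmap]
    simp

-- re-inserting the current value is the identity (unique keys)
theorem pv_insert_getD_self {ν : Type} (d : PySem.Dict String ν) (k : String) (dflt : ν)
    (hnd : d.keys.Nodup) (h : d.contains k = true) : d.insert k (d.getD k dflt) = d := by
  apply PySem.Dict.ext
  rw [pv_insert_of_contains _ _ _ h]
  have hnd' : (d.items.map Prod.fst).Nodup := by
    simpa [PySem.Dict.keys] using hnd
  refine (List.map_congr_left (fun p hp => ?_)).trans (List.map_id _)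
  by_cases hk : p.1 = k
  · have hgp : d.get? k = some p.2 := by
      have := pv_get?_nodup d.items hnd' p hp; rwa [hk] at this
    have hpr : (k, p.2) = p := by rw [← hk]
    simp [hk, PySem.Dict.getD, hgp, hpr]
  · simp [beq_eq_false_iff_ne.mpr hk]

-- ===== B-side: one pass over the indices acts pointwise on the items =====

theorem pv_stepB_map (g g' : Int → String) (i : Int) (its : List (String × PySem.Dict String Int))
    (h : (its.map Prod.fst).Nodup) :
    (if (PySem.Dict.mk its).contains (g i) then
       (PySem.Dict.mk its).insert (g i)
         (pvUpd (g' i) ((PySem.Dict.mk its).getD (g i) PySem.Dict.empty))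
     else PySem.Dict.mk its)
    = PySem.Dict.mk (its.map (fun p => (p.1, if g i == p.1 then pvUpd (g' i) p.2 else p.2))) := by
  by_cases hc : (PySem.Dict.mk its).contains (g i) = true
  · rw [if_pos hc]
    apply PySem.Dict.ext
    rw [pv_insert_of_contains _ _ _ hc]
    refine List.map_congr_left (fun p hp => ?_)
    by_cases hk : p.1 = g i
    · have hget : (PySem.Dict.mk its).get? (g i) = some p.2 := by
        have := pv_get?_nodup its h p hp; rwa [hk] at this
      simp [PySem.Dict.getD, hget, hk]
    · simp [beq_eq_false_iff_ne.mpr hk, beq_eq_false_iff_ne.mpr (Ne.symm hk)]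
  · have hc' : (PySem.Dict.mk its).contains (g i) = false := Bool.eq_false_iff.mpr hc
    rw [if_neg hc]
    apply PySem.Dict.ext
    refine ((List.map_congr_left (fun p hp => ?_)).trans (List.map_id _)).symm
    have : p.1 ≠ g i := pv_contains_eq_false its (g i) hc' p hp
    simp [beq_eq_false_iff_ne.mpr (Ne.symm this)]

theorem pv_foldB (g g' : Int → String) :
    ∀ (l : List Int) (its : List (String × PySem.Dict String Int)),
    (its.map Prod.fst).Nodup →
    l.foldl (fun d i =>
        if PySem.Dict.contains d (g i) then
          d.insert (g i) (pvUpd (g' i) (PySem.Dict.getD d (g i) PySem.Dict.empty))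
        else d) (PySem.Dict.mk its)
    = PySem.Dict.mk (its.map (fun p =>
        (p.1, l.foldl (fun e i => if g i == p.1 then pvUpd (g' i) e else e) p.2))) := by
  intro l
  induction l with
  | nil =>
    intro its _
    simp [List.foldl_nil]
  | cons i t ih =>
    intro its h
    rw [List.foldl_cons, pv_stepB_map g g' i its h]
    have hkeys : (its.map (fun p => (p.1, if g i == p.1 then pvUpd (g' i) p.2 else p.2))).map Prod.fst
        = its.map Prod.fst := by
      simp [List.map_map]
    rw [ih _ (by rw [hkeys]; exact h), List.map_map]
    congr 1

-- ===== A-side: the scan for a single word only touches that word's entry =====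

theorem pv_foldA_inner (w : String) (F : PySem.Dict String Int → Int → PySem.Dict String Int)
    (cond : Int → Bool) :
    ∀ (l : List Int) (d : PySem.Dict String (PySem.Dict String Int)),
    d.keys.Nodup → d.contains w = true →
    l.foldl (fun d i => if cond i then
        d.insert w (F (PySem.Dict.getD d w PySem.Dict.empty) i) else d) d
    = d.insert w (l.foldl (fun e i => if cond i then F e i else e)
        (PySem.Dict.getD d w PySem.Dict.empty)) := by
  intro l
  induction l with
  | nil =>
    intro d hnd hc
    rw [List.foldl_nil, List.foldl_nil, pv_insert_getD_self d w _ hnd hc]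
  | cons i t ih =>
    intro d hnd hc
    by_cases hci : cond i = true
    · have hc2 : (d.insert w (F (PySem.Dict.getD d w PySem.Dict.empty) i)).contains w = true := by
        have := PySem.Dict.get?_insert_self d w (F (PySem.Dict.getD d w PySem.Dict.empty) i)
        rcases hcc : (d.insert w _).contains w with _ | _
        · rw [(PySem.Dict.get?_eq_none_iff_contains _ _).mpr hcc] at this; cases this
        · rfl
      have hnd2 : (d.insert w (F (PySem.Dict.getD d w PySem.Dict.empty) i)).keys.Nodup := by
        rw [pv_keys_insert_of_contains _ _ _ hc]; exact hnd
      rw [List.foldl_cons, if_pos hci, ih _ hnd2 hc2,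
          PySem.Dict.getD_insert_self, pv_insert_insert, List.foldl_cons, if_pos hci]
    · have hci' : cond i = false := Bool.eq_false_iff.mpr hci
      rw [List.foldl_cons, if_neg (by simp [hci']), ih d hnd hc,
          List.foldl_cons, if_neg (by simp [hci'])]

-- ===== generic per-key rewrite fold (A's outer loops: 'for word in d.keys(): …') =====

theorem pv_fold_frame (S : PySem.Dict String (PySem.Dict String Int) → String → PySem.Dict String (PySem.Dict String Int))
    (G : String → PySem.Dict String Int → PySem.Dict String Int)
    (hS : ∀ d w, d.keys.Nodup → d.contains w = true →
      S d w = d.insert w (G w (PySem.Dict.getD d w PySem.Dict.empty))) :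
    ∀ (ks : List String) (a : String × PySem.Dict String Int)
      (rest : List (String × PySem.Dict String Int)),
    ((a :: rest).map Prod.fst).Nodup → (∀ k ∈ ks, k ∈ rest.map Prod.fst) →
    ks.foldl S (PySem.Dict.mk (a :: rest))
    = PySem.Dict.mk (a :: (ks.foldl S (PySem.Dict.mk rest)).items) := by
  intro ks
  induction ks with
  | nil => intro a rest _ _; rfl
  | cons w t ih =>
    intro a rest hnd hks
    have hw : w ∈ rest.map Prod.fst := hks w (List.mem_cons_self ..)
    have hna : a.1 ≠ w := by
      intro he
      simp only [List.map_cons, List.nodup_cons] at hnd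
      exact hnd.1 (he ▸ hw)
    obtain ⟨p, hp, hp1⟩ := List.mem_map.mp hw
    have hcr : (PySem.Dict.mk rest).contains w = true := hp1 ▸ pv_contains_of_mem rest p hp
    have hcar : (PySem.Dict.mk (a :: rest)).contains w = true := by
      simp only [PySem.Dict.contains, List.any_cons] at hcr ⊢
      simp [hcr]
    have hndr : (rest.map Prod.fst).Nodup := by
      simp only [List.map_cons, List.nodup_cons] at hnd; exact hnd.2
    have hnda : ((a :: rest).map Prod.fst).Nodup := hnd
    -- one step commutes with the untouched head entry
    have hstep : S (PySem.Dict.mk (a :: rest)) w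
        = PySem.Dict.mk (a :: (S (PySem.Dict.mk rest) w).items) := by
      rw [hS _ _ (by simpa [PySem.Dict.keys] using hnda) hcar,
          hS _ _ (by simpa [PySem.Dict.keys] using hndr) hcr]
      have hget : (PySem.Dict.mk (a :: rest)).getD w PySem.Dict.empty
          = (PySem.Dict.mk rest).getD w PySem.Dict.empty := by
        simp [PySem.Dict.getD, PySem.Dict.get?, beq_eq_false_iff_ne.mpr hna]
      rw [hget]
      by_cases hc : (PySem.Dict.mk rest).contains w = true
      · apply PySem.Dict.ext
        rw [pv_insert_of_contains _ _ _ hcar, pv_insert_of_contains _ _ _ hc, List.map_cons]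
        congr 1
        simp [beq_eq_false_iff_ne.mpr hna]
      · have hc' : (PySem.Dict.mk rest).contains w = false := Bool.eq_false_iff.mpr hc
        rw [hc'] at hcr; cases hcr
    have hkeys : (S (PySem.Dict.mk rest) w).items.map Prod.fst = rest.map Prod.fst := by
      have := pv_keys_insert_of_contains (PySem.Dict.mk rest) w
        (G w (PySem.Dict.getD (PySem.Dict.mk rest) w PySem.Dict.empty)) hcr
      rw [hS _ _ (by simpa [PySem.Dict.keys] using hndr) hcr]
      simpa [PySem.Dict.keys] using this
    rw [List.foldl_cons, hstep,
        ih a (S (PySem.Dict.mk rest) w).items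
          (by simp only [List.map_cons, List.nodup_cons] at hnd ⊢
              exact ⟨by rw [hkeys]; exact hnd.1, by rw [hkeys]; exact hnd.2⟩)
          (fun k hk => by rw [hkeys]; exact hks k (List.mem_cons_of_mem _ hk)),
        List.foldl_cons]

theorem pv_foldOuter (S : PySem.Dict String (PySem.Dict String Int) → String → PySem.Dict String (PySem.Dict String Int))
    (G : String → PySem.Dict String Int → PySem.Dict String Int)
    (hS : ∀ d w, d.keys.Nodup → d.contains w = true →
      S d w = d.insert w (G w (PySem.Dict.getD d w PySem.Dict.empty))) :
    ∀ (its : List (String × PySem.Dict String Int)), (its.map Prod.fst).Nodup →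
    (its.map Prod.fst).foldl S (PySem.Dict.mk its)
    = PySem.Dict.mk (its.map (fun p => (p.1, G p.1 p.2))) := by
  intro its
  induction its with
  | nil => intro _; rfl
  | cons a rest ih =>
    intro hnd
    have hndr : (rest.map Prod.fst).Nodup := by
      simp only [List.map_cons, List.nodup_cons] at hnd; exact hnd.2
    have hca : (PySem.Dict.mk (a :: rest)).contains a.1 = true :=
      pv_contains_of_mem _ a (List.mem_cons_self ..)
    have hget : (PySem.Dict.mk (a :: rest)).getD a.1 PySem.Dict.empty = a.2 := by
      simp [PySem.Dict.getD, PySem.Dict.get?]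
    -- first step rewrites the head entry in place
    have hstep : S (PySem.Dict.mk (a :: rest)) a.1
        = PySem.Dict.mk ((a.1, G a.1 a.2) :: rest) := by
      rw [hS _ _ (by simpa [PySem.Dict.keys] using hnd) hca, hget]
      apply PySem.Dict.ext
      rw [pv_insert_of_contains _ _ _ hca]
      simp only [List.map_cons, beq_self_eq_true, if_pos]
      congr 1
      refine (List.map_congr_left (fun p hp => ?_)).trans (List.map_id _)
      have : a.1 ∉ rest.map Prod.fst := by
        simp only [List.map_cons, List.nodup_cons] at hnd; exact hnd.1
      have hne : p.1 ≠ a.1 := fun he => this (he ▸ List.mem_map_of_mem hp)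
      simp [beq_eq_false_iff_ne.mpr hne]
    rw [List.map_cons, List.foldl_cons, hstep,
        pv_fold_frame S G hS (rest.map Prod.fst) (a.1, G a.1 a.2) rest
          (by simpa using hnd) (fun k hk => hk),
        ih hndr, List.map_cons]

-- ===== building a dict by inserting fresh keys appends =====

theorem pv_fold_insert_fresh {α ν : Type} (key : α → String) (val : α → ν) :
    ∀ (l : List α) (pre : List (String × ν)),
    (pre.map Prod.fst ++ l.map key).Nodup →
    l.foldl (fun d x => d.insert (key x) (val x)) (PySem.Dict.mk pre)
    = PySem.Dict.mk (pre ++ l.map (fun x => (key x, val x))) := by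
  intro l
  induction l with
  | nil => intro pre _; simp
  | cons x t ih =>
    intro pre h
    have hx : key x ∉ pre.map Prod.fst := by
      intro hmem
      rcases List.nodup_append.mp h with ⟨_, _, hdisj⟩
      exact hdisj (key x) hmem (key x) (show key x ∈ (x :: t).map key by simp) rfl
    have hc : (PySem.Dict.mk pre).contains (key x) = false := by
      simp only [PySem.Dict.contains, List.any_eq_false]
      intro p hp
      simp only [beq_iff_eq]
      intro he
      exact hx (by rw [← he]; exact List.mem_map_of_mem hp)
    have hstep : (PySem.Dict.mk pre).insert (key x) (val x)
        = PySem.Dict.mk (pre ++ [(key x, val x)]) := by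
      simp [PySem.Dict.insert, hc]
    rw [List.foldl_cons, hstep, ih (pre ++ [(key x, val x)])
        (by simpa [List.append_assoc] using h)]
    simp

-- dict(pairs) with unique keys keeps the pairs list
theorem pv_ofList_items {ν : Type} (ps : List (String × ν)) (h : (ps.map Prod.fst).Nodup) :
    (PySem.Dict.ofList ps).items = ps := by
  have : PySem.Dict.ofList ps
      = ps.foldl (fun d p => d.insert p.1 p.2) (PySem.Dict.mk []) := rfl
  rw [this, pv_fold_insert_fresh Prod.fst Prod.snd ps [] (by simpa using h)]
  simp

-- the 5 most common words are pairwise distinct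
theorem pv_nodup_common (words : List String) :
    ((pvMostCommon5 words).map Prod.fst).Nodup := by
  have h1 : ((PySem.Dict.counter words).items.map Prod.fst).Nodup := by
    simpa [PySem.Dict.keys] using PySem.Dict.nodup_keys_counter words
  have hperm : (PySem.List.sorted (PySem.Dict.counter words).items (fun p => p.2) true).Perm
      (PySem.Dict.counter words).items := PySem.List.sorted_perm _ _ _
  have h2 : ((PySem.List.sorted (PySem.Dict.counter words).items (fun p => p.2) true).map Prod.fst).Nodup :=
    ((hperm.map Prod.fst).nodup_iff).mpr h1
  have hsub : ((pvMostCommon5 words).map Prod.fst).Sublist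
      ((PySem.List.sorted (PySem.Dict.counter words).items (fun p => p.2) true).map Prod.fst) :=
    (List.take_sublist _ _).map Prod.fst
  exact h2.sublist hsub

-- A's two-branch counter update is the unconditional one
theorem pv_branch_collapse (e : PySem.Dict String Int) (s : String) :
    (if e.contains s then e.insert s (PySem.Dict.getD e s 0 + 1) else e.insert s 1)
    = pvUpd s e := by
  by_cases h : e.contains s = true
  · simp [pvUpd, h]
  · have h' : e.contains s = false := by simpa using h
    have : e.get? s = none := (PySem.Dict.get?_eq_none_iff_contains _ _).mpr h'
    simp [pvUpd, h', PySem.Dict.getD, this]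

-- canonical intermediate values shared by the two evaluations
def pvScan (words : List String) (w : String) (e : PySem.Dict String Int) : PySem.Dict String Int :=
  (PySem.List.pyRange 0 (words.length : Int) 1).foldl
    (fun e i => if w == PySem.List.pyGetD words i "" then
      pvUpd (PySem.List.pyGetD words (i + 1) "") e else e) e

def pvIts0 (words : List String) : List (String × PySem.Dict String Int) :=
  (pvMostCommon5 words).map (fun p => (p.1, PySem.Dict.empty))

def pvIts1 (words : List String) : List (String × PySem.Dict String Int) :=
  (pvIts0 words).map (fun p => (p.1, pvScan words p.1 p.2))

def pvTop3 (e : PySem.Dict String Int) : PySem.Dict String Int :=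
  PySem.Dict.ofList ((PySem.List.sorted e.items (fun q => q.2) true).take 3)

def pvFinal (words : List String) : List (String × PySem.Dict String Int) :=
  (pvIts1 words).map (fun p => (p.1, pvTop3 p.2))

theorem pv_nodup_its0 (words : List String) : ((pvIts0 words).map Prod.fst).Nodup := by
  have h := pv_nodup_common words
  have heq : (pvIts0 words).map Prod.fst = (pvMostCommon5 words).map Prod.fst := by
    simp [pvIts0, List.map_map, Function.comp]
  rw [heq]; exact h

theorem pv_nodup_its1 (words : List String) : ((pvIts1 words).map Prod.fst).Nodup := by
  have h := pv_nodup_its0 words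
  have he : (pvIts1 words).map Prod.fst = (pvIts0 words).map Prod.fst := by
    simp [pvIts1, List.map_map, Function.comp]
  rw [he]; exact h

theorem pv_A_eq (file_data : List String) :
    common_successor_words file_data
    = (pvFinal (pvAllWords file_data)).map (fun p => (p.1, p.2.items)) := by
  simp only [common_successor_words]
  set words := pvAllWords file_data with hw
  set common := pvMostCommon5 words with hc
  have hnd : (common.map Prod.fst).Nodup := by rw [hc]; exact pv_nodup_common words
  have hkeys : (PySem.Dict.ofList common).keys = common.map Prod.fst := by
    show (PySem.Dict.ofList common).items.map (fun x => x.1) = common.map Prod.fst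
    rw [pv_ofList_items common hnd]
  rw [hkeys]
  have hck : (common.map Prod.fst).map (fun i => PySem.Str.slice i none none)
      = common.map Prod.fst :=
    (List.map_congr_left (fun s _ => pv_slice_id s)).trans (List.map_id _)
  rw [hck]
  have hcw0 : (common.map Prod.fst).foldl (fun d i => d.insert i PySem.Dict.empty) PySem.Dict.empty
      = PySem.Dict.mk (pvIts0 words) := by
    have := pv_fold_insert_fresh (fun s : String => s)
      (fun _ : String => (PySem.Dict.empty : PySem.Dict String Int))
      (common.map Prod.fst) [] (by simpa using hnd)
    rw [show (PySem.Dict.mk [] : PySem.Dict String (PySem.Dict String Int))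
        = PySem.Dict.empty from rfl] at this
    rw [this]
    simp [pvIts0, List.map_map, Function.comp, ← hc]
  rw [hcw0]
  have hfst0 : common.map Prod.fst = (pvIts0 words).map Prod.fst := by
    simp [pvIts0, List.map_map, Function.comp, ← hc]
  rw [hfst0]
  have hA : ((pvIts0 words).map Prod.fst).foldl (fun d word =>
      (PySem.List.pyRange 0 (words.length : Int) 1).foldl (fun d i =>
        if word == PySem.List.pyGetD words i "" then
          if (PySem.Dict.getD d word PySem.Dict.empty).contains (PySem.List.pyGetD words (i + 1) "") then
            d.insert word ((PySem.Dict.getD d word PySem.Dict.empty).insert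
              (PySem.List.pyGetD words (i + 1) "")
              (PySem.Dict.getD (PySem.Dict.getD d word PySem.Dict.empty)
                (PySem.List.pyGetD words (i + 1) "") 0 + 1))
          else d.insert word ((PySem.Dict.getD d word PySem.Dict.empty).insert
            (PySem.List.pyGetD words (i + 1) "") 1)
        else d) d) (PySem.Dict.mk (pvIts0 words))
      = PySem.Dict.mk (pvIts1 words) := by
    refine pv_foldOuter _ (fun w e => pvScan words w e) ?_ (pvIts0 words) (pv_nodup_its0 words)
    intro d w hdnd hdc
    have hre : (fun (d : PySem.Dict String (PySem.Dict String Int)) (i : Int) =>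
        if w == PySem.List.pyGetD words i "" then
          if (PySem.Dict.getD d w PySem.Dict.empty).contains (PySem.List.pyGetD words (i + 1) "") then
            d.insert w ((PySem.Dict.getD d w PySem.Dict.empty).insert
              (PySem.List.pyGetD words (i + 1) "")
              (PySem.Dict.getD (PySem.Dict.getD d w PySem.Dict.empty)
                (PySem.List.pyGetD words (i + 1) "") 0 + 1))
          else d.insert w ((PySem.Dict.getD d w PySem.Dict.empty).insert
            (PySem.List.pyGetD words (i + 1) "") 1)
        else d)
        = (fun d i => if ((w == PySem.List.pyGetD words i "" : Bool)) then
            d.insert w (pvUpd (PySem.List.pyGetD words (i + 1) "")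
              (PySem.Dict.getD d w PySem.Dict.empty)) else d) := by
      funext d i
      by_cases hcnd : (w == PySem.List.pyGetD words i "") = true
      · rw [if_pos hcnd, if_pos hcnd,
          ← pv_branch_collapse (PySem.Dict.getD d w PySem.Dict.empty) (PySem.List.pyGetD words (i + 1) "")]
        exact (apply_ite (d.insert w) _ _ _).symm
      · rw [if_neg hcnd, if_neg hcnd]
    rw [hre]
    exact pv_foldA_inner w (fun e i => pvUpd (PySem.List.pyGetD words (i + 1) "") e)
      (fun i => w == PySem.List.pyGetD words i "") (PySem.List.pyRange 0 (words.length : Int) 1)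
      d hdnd hdc
  rw [hA]
  have hk1 : (PySem.Dict.mk (pvIts1 words)).keys = (pvIts1 words).map Prod.fst := rfl
  rw [hk1]
  have hA2 : ((pvIts1 words).map Prod.fst).foldl (fun d word =>
        d.insert word (PySem.Dict.ofList
          ((PySem.List.sorted (PySem.Dict.getD d word PySem.Dict.empty).items
            (fun q => q.2) true).take 3))) (PySem.Dict.mk (pvIts1 words))
      = PySem.Dict.mk (pvFinal words) :=
    pv_foldOuter _ (fun _ e => pvTop3 e) (fun d w _ _ => rfl) (pvIts1 words) (pv_nodup_its1 words)
  rw [hA2]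

theorem pv_B_eq (file_data : List String) :
    common_successor_words_alt file_data
    = (pvFinal (pvAllWords file_data)).map (fun p => (p.1, p.2.items)) := by
  simp only [common_successor_words_alt]
  set words := pvAllWords file_data with hw
  set common := pvMostCommon5 words with hc
  have hnd : (common.map Prod.fst).Nodup := by rw [hc]; exact pv_nodup_common words
  have hd0 : common.foldl (fun d p => d.insert p.1 PySem.Dict.empty) PySem.Dict.empty
      = PySem.Dict.mk (pvIts0 words) := by
    have := pv_fold_insert_fresh (Prod.fst : String × Int → String)
      (fun _ => (PySem.Dict.empty : PySem.Dict String Int)) common [] (by simpa using hnd)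
    rw [show (PySem.Dict.mk [] : PySem.Dict String (PySem.Dict String Int))
        = PySem.Dict.empty from rfl] at this
    rw [this]
    simp [pvIts0, ← hc]
  rw [hd0]
  have hmod : (fun (d : PySem.Dict String (PySem.Dict String Int)) (i : Int) =>
      if PySem.Dict.contains d (PySem.List.pyGetD words i "") then
        PySem.Dict.modify d (PySem.List.pyGetD words i "") PySem.Dict.empty
          (fun inner => inner.insert (PySem.List.pyGetD words (i + 1) "")
            (PySem.Dict.getD inner (PySem.List.pyGetD words (i + 1) "") 0 + 1))
      else d)
      = (fun d i => if PySem.Dict.contains d (PySem.List.pyGetD words i "") then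
          d.insert (PySem.List.pyGetD words i "")
            (pvUpd (PySem.List.pyGetD words (i + 1) "")
              (PySem.Dict.getD d (PySem.List.pyGetD words i "") PySem.Dict.empty))
        else d) := rfl
  rw [hmod, pv_foldB (fun i => PySem.List.pyGetD words i "")
    (fun i => PySem.List.pyGetD words (i + 1) "")
    (PySem.List.pyRange 0 (words.length : Int) 1) (pvIts0 words) (pv_nodup_its0 words)]
  have hscan : (pvIts0 words).map (fun p =>
      (p.1, (PySem.List.pyRange 0 (words.length : Int) 1).foldl
        (fun e i => if PySem.List.pyGetD words i "" == p.1 then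
          pvUpd (PySem.List.pyGetD words (i + 1) "") e else e) p.2))
      = pvIts1 words := by
    refine List.map_congr_left (fun p _ => ?_)
    show _ = (p.1, pvScan words p.1 p.2)
    congr 1
    unfold pvScan
    congr 1
    funext e i
    rw [Bool.beq_comm]
  rw [hscan]
  have hout : (fun (d : PySem.Dict String (PySem.Dict String Int)) (p : String × PySem.Dict String Int) =>
      d.insert p.1 (PySem.Dict.ofList
        ((PySem.List.sorted p.2.items (fun q => q.2) true).take 3)))
      = (fun d p => d.insert p.1 (pvTop3 p.2)) := rfl
  have hB2 : (pvIts1 words).foldl (fun d p => d.insert p.1 (pvTop3 p.2)) PySem.Dict.empty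
      = PySem.Dict.mk (pvFinal words) := by
    have := pv_fold_insert_fresh (Prod.fst : String × PySem.Dict String Int → String)
      (fun p => pvTop3 p.2) (pvIts1 words) [] (by simpa using pv_nodup_its1 words)
    rw [show (PySem.Dict.mk [] : PySem.Dict String (PySem.Dict String Int))
        = PySem.Dict.empty from rfl] at this
    rw [this]
    simp [pvFinal]
  rw [show (PySem.Dict.mk (pvIts1 words)).items = pvIts1 words from rfl, hout, hB2]

-- ===== VERDICT (by name: the statement is the Claim_ definition above) =====
theorem common_successor_words_spec : Claim_equal_common_successor_words := by
  intro file_data _ _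
  unfold Spec_common_successor_words
  rw [pv_A_eq, pv_B_eq]
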